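-- pv_equiv track=rewrite | github.com/theelephantman26/Algorithms | assignment_1_binary_search_tree.py | checkNodePosition
-- ===== SOURCE A (Python) =====
-- def checkNodePosition(key, parent_nodes, sub_tree):
--     parent_nodes.append([key, sub_tree])
--     result = True
--     for i in range(0, len(parent_nodes)-1):
--         if parent_nodes[i+1][1] is -1:
--             result = result and parent_nodes[i][0] > key
--         else:
--             result = result and parent_nodes[i][0] < key
--     del parent_nodes[-1]
--     return result
-- ===== SOURCE B (Python) =====
-- def checkNodePosition(key, parent_nodes, sub_tree):
--     # Recursive descent over the ancestor list with short-circuit: each call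
--     # checks the head ancestor's bound against key using the next node's
--     # direction flag (sub_tree at the end), then recurses on the tail; the
--     # recursion stops as soon as one check fails.  parent_nodes is not mutated.
--     def check(nodes):
--         if not nodes:
--             return True
--         flag = nodes[1][1] if len(nodes) > 1 else sub_tree
--         if flag is -1:
--             ok = nodes[0][0] > key
--         else:
--             ok = nodes[0][0] < key
--         return ok and check(nodes[1:])
--     return check(parent_nodes)
-- ===== Notes on version B (the rewrite author's own statement) =====
-- stated objective: alternative
-- what changed: A mutates the list (append a sentinel, index-loop over range, delete the sentinel) and ANDs every comparison into an accumulator; B is a short-circuiting recursion on the list structure that checks the head ancestor and recurses on the tail, stopping at the first failed check and never mutating parent_nodes.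
import Mathlib
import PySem

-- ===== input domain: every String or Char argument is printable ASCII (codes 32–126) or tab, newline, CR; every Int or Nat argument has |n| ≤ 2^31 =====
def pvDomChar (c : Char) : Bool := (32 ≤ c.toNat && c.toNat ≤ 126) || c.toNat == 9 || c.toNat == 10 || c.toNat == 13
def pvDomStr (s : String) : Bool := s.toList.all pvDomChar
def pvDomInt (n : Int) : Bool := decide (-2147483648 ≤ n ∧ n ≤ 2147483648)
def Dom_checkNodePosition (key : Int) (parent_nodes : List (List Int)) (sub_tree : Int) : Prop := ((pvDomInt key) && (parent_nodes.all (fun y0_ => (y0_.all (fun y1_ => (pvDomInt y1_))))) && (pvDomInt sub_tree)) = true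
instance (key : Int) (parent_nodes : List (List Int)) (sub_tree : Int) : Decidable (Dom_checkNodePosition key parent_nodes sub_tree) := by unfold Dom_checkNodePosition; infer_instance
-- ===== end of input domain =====

-- B replaces A's mutate-then-index loop (append a sentinel, AND every comparison
-- into an accumulator, delete the sentinel) by a short-circuiting recursion on
-- the list structure that never mutates parent_nodes (alternative decomposition,
-- same cost). A appends to and then deletes from parent_nodes, restoring it, so
-- there is no net mutation; equivalence is about the return value.

-- ===== PORT A =====
def checkNodePosition (key : Int) (parent_nodes : List (List Int)) (sub_tree : Int) : Bool :=
  -- parent_nodes.append([key, sub_tree]); loop over i; del parent_nodes[-1]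
  let pn := parent_nodes ++ [[key, sub_tree]]
  (PySem.List.pyRange 0 ((pn.length : Int) - 1)).foldl
    (fun result i =>
      if PySem.List.pyGetD (PySem.List.pyGetD pn (i + 1) []) 1 0 = -1 then
        result && decide (PySem.List.pyGetD (PySem.List.pyGetD pn i []) 0 0 > key)
      else
        result && decide (PySem.List.pyGetD (PySem.List.pyGetD pn i []) 0 0 < key))
    true

-- ===== PORT B =====
-- Source B's inner recursive helper `check`, step for step (nodes[1:] is the tail)
def checkHelper (key : Int) (sub_tree : Int) : List (List Int) → Bool
  | [] => true
  | node :: rest =>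
    let flag := match rest with
      | next :: _ => PySem.List.pyGetD next 1 0
      | [] => sub_tree
    let ok := if flag = -1 then decide (PySem.List.pyGetD node 0 0 > key)
              else decide (PySem.List.pyGetD node 0 0 < key)
    ok && checkHelper key sub_tree rest

def checkNodePosition_alt (key : Int) (parent_nodes : List (List Int)) (sub_tree : Int) : Bool :=
  checkHelper key sub_tree parent_nodes

-- ===== PRECONDITION & SPEC =====
-- Pre_ excludes exactly the inputs on which Python A raises IndexError: some
-- parent list is missing an accessed element (the first parent needs an
-- element 0, every later parent needs elements 0 and 1).
def Pre_checkNodePosition (key : Int) (parent_nodes : List (List Int)) (sub_tree : Int) : Prop :=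
  (∀ l ∈ parent_nodes, l ≠ []) ∧ (∀ l ∈ parent_nodes.tail, 2 ≤ l.length)
instance (key : Int) (parent_nodes : List (List Int)) (sub_tree : Int) : Decidable (Pre_checkNodePosition key parent_nodes sub_tree) := by unfold Pre_checkNodePosition; infer_instance

def pvWitness_checkNodePosition : Int × List (List Int) × Int := (5, [[10, -1], [3, 1]], -1)

def Spec_checkNodePosition (key : Int) (parent_nodes : List (List Int)) (sub_tree : Int) (out : Bool) : Prop := out = checkNodePosition_alt key parent_nodes sub_tree
instance (key : Int) (parent_nodes : List (List Int)) (sub_tree : Int) (out : Bool) : Decidable (Spec_checkNodePosition key parent_nodes sub_tree out) := by unfold Spec_checkNodePosition; infer_instance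

-- ===== CLAIM (what is proved, stated in full; the proofs are below) =====
def Claim_equal_checkNodePosition : Prop := ∀ (key : Int) (parent_nodes : List (List Int)) (sub_tree : Int), Dom_checkNodePosition key parent_nodes sub_tree → Pre_checkNodePosition key parent_nodes sub_tree → Spec_checkNodePosition key parent_nodes sub_tree (checkNodePosition key parent_nodes sub_tree)

-- ===== LEMMAS AND PROOFS =====

-- the comparison each ancestor contributes: (bound, flag) ↦ the Bool A ANDs in
def pvCond (key : Int) (w : Int × Int) : Bool :=
  if w.2 = -1 then decide (w.1 > key) else decide (w.1 < key)

-- the (bound, flag) pairs both programs inspect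
def pvPairs (key sub_tree : Int) (pn : List (List Int)) : List (Int × Int) :=
  ((pn ++ [[key, sub_tree]]).zip (pn ++ [[key, sub_tree]]).tail).map
    (fun w => (PySem.List.pyGetD w.1 0 0, PySem.List.pyGetD w.2 1 0))

theorem pv_zip_append_right {α : Type} : ∀ (l₁ : List α) (z : α) (l₂ : List α),
    l₂.length ≤ l₁.length → (l₁ ++ [z]).zip l₂ = l₁.zip l₂ := by
  intro l₁
  induction l₁ with
  | nil => intro z l₂ h; have : l₂ = [] := by cases l₂ <;> simp_all
           simp [this]
  | cons a t ih =>
    intro z l₂ h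
    cases l₂ with
    | nil => simp
    | cons b s => simp only [List.cons_append, List.zip_cons_cons, List.cons.injEq, true_and]
                  exact ih z s (by simpa using h)

theorem pv_ext_zip (l : List (List Int)) (x : List Int) :
    (l ++ [x]).zip (l ++ [x]).tail = l.zip (l.tail ++ [x]) := by
  cases l with
  | nil => simp
  | cons h t =>
    have : ((h :: t) ++ [x]).tail = t ++ [x] := by simp
    rw [this, List.tail_cons]
    exact pv_zip_append_right (h :: t) x (t ++ [x]) (by simp)

theorem pv_A_pairs (key : Int) (pn : List (List Int)) (st : Int) :
    checkNodePosition key pn st =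
      (pvPairs key st pn).foldl (fun r w => r && pvCond key w) true := by
  have hzlen : ((pn ++ [[key, st]]).zip (pn ++ [[key, st]]).tail).length = pn.length := by
    simp [List.length_zip]
  have hb : ((pn ++ [[key, st]]).length : Int) - 1 =
      (((pn ++ [[key, st]]).zip (pn ++ [[key, st]]).tail).length : Int) := by
    rw [hzlen]; simp
  simp only [checkNodePosition, pvPairs]
  rw [hb, List.foldl_map,
    ← PySem.List.foldl_pyRange_zero_pyGetD' ((pn ++ [[key, st]]).zip (pn ++ [[key, st]]).tail)
      ([], [])
      (fun r w => r && pvCond key (PySem.List.pyGetD w.1 0 0, PySem.List.pyGetD w.2 1 0)) true]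
  apply PySem.List.foldl_congr_mem
  intro acc j hj
  obtain ⟨h0, h1⟩ := (PySem.List.mem_pyRange_one).mp hj
  rw [hzlen] at h1
  have hjn : j.toNat < pn.length := by omega
  have hlen : (pn ++ [[key, st]]).length = pn.length + 1 := by simp
  rw [PySem.List.pyGetD_eq_getElem ((pn ++ [[key, st]]).zip (pn ++ [[key, st]]).tail)
      (([], []) : List Int × List Int) h0 (by rw [hzlen]; exact_mod_cast h1)]
  rw [PySem.List.pyGetD_eq_getElem (pn ++ [[key, st]]) ([] : List Int) h0
      (by rw [hlen]; push_cast; omega)]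
  rw [PySem.List.pyGetD_eq_getElem (pn ++ [[key, st]]) ([] : List Int) (by omega)
      (by rw [hlen]; push_cast; omega)]
  simp only [List.getElem_zip, List.getElem_tail,
    show (j + 1).toNat = j.toNat + 1 from by omega]
  by_cases hc : PySem.List.pyGetD ((pn ++ [[key, st]])[j.toNat + 1]'(by simp; omega)) 1 0 = -1 <;>
    simp [pvCond, hc]

theorem pv_B_pairs (key st : Int) : ∀ (pn : List (List Int)),
    checkNodePosition_alt key pn st = (pvPairs key st pn).all (pvCond key) := by
  have main : ∀ (pn : List (List Int)),
      checkHelper key st pn =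
        (pn.zip (pn.tail ++ [[key, st]])).all
          (fun w => pvCond key (PySem.List.pyGetD w.1 0 0, PySem.List.pyGetD w.2 1 0)) := by
    intro pn
    induction pn with
    | nil => simp [checkHelper]
    | cons node rest ih =>
      cases rest with
      | nil => simp [checkHelper, pvCond, PySem.List.pyGetD]
      | cons next rest' =>
        rw [show checkHelper key st (node :: next :: rest') =
            ((if PySem.List.pyGetD next 1 0 = -1 then decide (PySem.List.pyGetD node 0 0 > key)
              else decide (PySem.List.pyGetD node 0 0 < key)) &&
             checkHelper key st (next :: rest')) from rfl, ih]
        simp only [List.tail_cons, List.cons_append, List.zip_cons_cons, List.all_cons]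
        by_cases hc : PySem.List.pyGetD next 1 0 = -1 <;> simp [pvCond, hc]
  intro pn
  rw [checkNodePosition_alt, main, pvPairs, List.all_map, pv_ext_zip]
  rfl

theorem pv_foldl_and (key : Int) : ∀ (ws : List (Int × Int)) (r : Bool),
    ws.foldl (fun r w => r && pvCond key w) r = (r && ws.all (pvCond key)) := by
  intro ws
  induction ws with
  | nil => intro r; simp
  | cons w ws ih => intro r; simp [List.foldl_cons, ih, Bool.and_assoc]

-- ===== VERDICT (by name: the statement is the Claim_ definition above) =====
theorem checkNodePosition_spec : Claim_equal_checkNodePosition := by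
  intro key pn st _ _
  show checkNodePosition key pn st = checkNodePosition_alt key pn st
  rw [pv_A_pairs, pv_B_pairs, pv_foldl_and]
  simp
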